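-- pv_equiv track=rewrite | github.com/thejohncrafter/OCalme | src/Tokenizer.py | toNumber
-- ===== SOURCE A (Python) =====
-- def toNumber(char):
--     for i, c in enumerate({
--         "0": 0,
--         "1": 1,
--         "2": 2,
--         "3": 3,
--         "4": 4,
--         "5": 5,
--         "6": 6,
--         "7": 7,
--         "8": 8,
--         "9": 9
--     }):
--         if char == c: return i
--     return None
-- ===== SOURCE B (Python) =====
-- def toNumber(char):
--     if isinstance(char, str) and len(char) == 1 and '0' <= char <= '9':
--         return ord(char) - ord('0')
--     return None
-- ===== Notes on version B (the rewrite author's own statement) =====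
-- stated objective: simpler
-- what changed: Replaced the 10-entry dict scan with a single-character range check and ord arithmetic (closed form, no table, no loop).
import Mathlib
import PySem

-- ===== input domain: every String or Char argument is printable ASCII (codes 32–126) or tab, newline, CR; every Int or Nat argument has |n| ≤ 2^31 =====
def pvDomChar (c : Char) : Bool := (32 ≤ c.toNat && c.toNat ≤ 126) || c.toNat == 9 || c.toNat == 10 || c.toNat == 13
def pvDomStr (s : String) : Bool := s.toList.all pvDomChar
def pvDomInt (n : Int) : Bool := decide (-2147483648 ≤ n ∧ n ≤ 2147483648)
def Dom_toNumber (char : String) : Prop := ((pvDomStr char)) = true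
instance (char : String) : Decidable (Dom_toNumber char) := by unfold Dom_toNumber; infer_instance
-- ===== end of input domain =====

-- B replaces A's 10-entry dict scan with a single-char range check and ord arithmetic (simpler, no table).

-- ===== PORT A =====
-- A enumerates the dict's keys "0".."9" with their index i and returns i on the first match.
def toNumberLoop (char : String) : List (Int × String) → Option Int
  | [] => none
  | (i, c) :: rest => if char = c then some i else toNumberLoop char rest

def toNumber (char : String) : Option Int :=
  toNumberLoop char [(0, "0"), (1, "1"), (2, "2"), (3, "3"), (4, "4"),
                     (5, "5"), (6, "6"), (7, "7"), (8, "8"), (9, "9")]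

-- ===== PORT B =====
-- Source B: len(char) == 1 and '0' <= char <= '9' (a range check on the single character), then ord(char) - ord('0').
def toNumber_alt (char : String) : Option Int :=
  match char.toList with
  | [c] => if 48 ≤ c.toNat ∧ c.toNat ≤ 57 then some ((c.toNat : Int) - 48) else none
  | _ => none

-- ===== PRECONDITION & SPEC =====
def Spec_toNumber (char : String) (out : Option Int) : Prop := out = toNumber_alt char
instance (char : String) (out : Option Int) : Decidable (Spec_toNumber char out) := by unfold Spec_toNumber; infer_instance

-- ===== CLAIM (what is proved, stated in full; the proofs are below) =====
def Claim_equal_toNumber : Prop := ∀ (char : String), Dom_toNumber char → Spec_toNumber char (toNumber char)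

-- ===== LEMMAS AND PROOFS =====
lemma toNumber_eq_alt (char : String) : toNumber char = toNumber_alt char := by
  have hmk : String.ofList char.toList = char := String.ofList_toList
  rcases hl : char.toList with _ | ⟨c, _ | ⟨c', rest⟩⟩
  · have : char = "" := by rw [← hmk, hl]
    subst this
    decide
  · -- single character
    have hc : char = String.ofList [c] := by rw [← hmk, hl]
    subst hc
    by_cases h : 48 ≤ c.toNat ∧ c.toNat ≤ 57
    · have hofn : Char.ofNat c.toNat = c := Char.ofNat_toNat c
      obtain ⟨h1, h2⟩ := h
      interval_cases hn : c.toNat <;> (rw [← hofn]; decide)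
    · have hB : toNumber_alt (String.ofList [c]) = none := by
        simp [toNumber_alt, h]
      rw [hB]
      -- A's loop: each comparison String.ofList [c] = "k" forces c.toNat ∈ [48,57], contradiction
      simp only [toNumber, toNumberLoop]
      split_ifs with h0 h1 h2 h3 h4 h5 h6 h7 h8 h9 <;>
        first
        | rfl
        | (exfalso; apply h
           first
           | (have : c = '0' := by have := congrArg String.toList h0; simpa using this
              subst this; decide)
           | (have : c = '1' := by have := congrArg String.toList h1; simpa using this
              subst this; decide)
           | (have : c = '2' := by have := congrArg String.toList h2; simpa using this
              subst this; decide)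
           | (have : c = '3' := by have := congrArg String.toList h3; simpa using this
              subst this; decide)
           | (have : c = '4' := by have := congrArg String.toList h4; simpa using this
              subst this; decide)
           | (have : c = '5' := by have := congrArg String.toList h5; simpa using this
              subst this; decide)
           | (have : c = '6' := by have := congrArg String.toList h6; simpa using this
              subst this; decide)
           | (have : c = '7' := by have := congrArg String.toList h7; simpa using this
              subst this; decide)
           | (have : c = '8' := by have := congrArg String.toList h8; simpa using this
              subst this; decide)
           | (have : c = '9' := by have := congrArg String.toList h9; simpa using this
              subst this; decide))
  · -- length ≥ 2: B gives none; A's comparisons against 1-char strings all fail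
    have hc : char = String.ofList (c :: c' :: rest) := by rw [← hmk, hl]
    subst hc
    have hB : toNumber_alt (String.ofList (c :: c' :: rest)) = none := by
      simp [toNumber_alt]
    rw [hB]
    simp only [toNumber, toNumberLoop]
    have hne : ∀ (d : Char) (s : String), s.toList = [d] →
        String.ofList (c :: c' :: rest) ≠ s := by
      intro d s hs h
      have := congrArg String.toList h
      rw [String.toList_ofList, hs] at this
      injection this with _ h2
      exact absurd h2 (List.cons_ne_nil _ _)
    rw [if_neg (hne '0' "0" rfl), if_neg (hne '1' "1" rfl), if_neg (hne '2' "2" rfl),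
        if_neg (hne '3' "3" rfl), if_neg (hne '4' "4" rfl), if_neg (hne '5' "5" rfl),
        if_neg (hne '6' "6" rfl), if_neg (hne '7' "7" rfl), if_neg (hne '8' "8" rfl),
        if_neg (hne '9' "9" rfl)]

-- ===== VERDICT (by name: the statement is the Claim_ definition above) =====
theorem toNumber_spec : Claim_equal_toNumber := by
  intro char _
  exact toNumber_eq_alt char
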